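-- pv_equiv track=rewrite | github.com/Rai220/anima | epoch_2/generation_1/prime_gap_dynamics_v2.py | gilbreath_first_elements
-- ===== SOURCE A (Python) =====
-- def gilbreath_first_elements(seq, max_depth):
--     row = seq[:]
--     firsts = []
--     for d in range(max_depth):
--         if len(row) < 2:
--             break
--         row = [abs(row[i+1] - row[i]) for i in range(len(row) - 1)]
--         firsts.append(row[0])
--     return firsts
-- ===== SOURCE B (Python) =====
-- def gilbreath_first_elements(seq, max_depth):
--     if max_depth <= 0 or len(seq) < 2:
--         return []
--     diff = [abs(b - a) for a, b in zip(seq, seq[1:])]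
--     return [diff[0]] + gilbreath_first_elements(diff, max_depth - 1)
-- ===== Notes on version B (the rewrite author's own statement) =====
-- stated objective: alternative
-- what changed: Replaced the depth-indexed for-loop mutating a row/firsts pair with structural recursion on the shrinking difference sequence, computing each row by zipping the sequence with its own tail instead of indexing over range(len(row)-1).
import Mathlib
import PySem

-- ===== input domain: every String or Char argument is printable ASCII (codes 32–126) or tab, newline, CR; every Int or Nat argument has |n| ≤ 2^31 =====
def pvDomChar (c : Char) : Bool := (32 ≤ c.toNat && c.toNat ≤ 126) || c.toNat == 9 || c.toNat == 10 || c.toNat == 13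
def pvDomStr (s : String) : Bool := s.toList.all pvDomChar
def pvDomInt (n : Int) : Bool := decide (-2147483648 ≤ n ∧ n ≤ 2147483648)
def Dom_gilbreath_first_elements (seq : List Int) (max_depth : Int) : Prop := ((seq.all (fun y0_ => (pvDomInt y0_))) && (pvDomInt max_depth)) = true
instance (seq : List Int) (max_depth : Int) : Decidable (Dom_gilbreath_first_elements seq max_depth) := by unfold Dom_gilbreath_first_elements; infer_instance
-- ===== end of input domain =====

-- B replaces A's depth-for-loop over a mutated row with recursion on the shrinking
-- difference sequence (objective: alternative decomposition, same cost).

-- ===== PORT A =====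
-- A's inner comprehension: [abs(row[i+1]-row[i]) for i in range(len(row)-1)];
-- every index is in range (i, i+1 < len(row)), so getD is exact here.
def pvRowA (row : List Int) : List Int :=
  (List.range (row.length - 1)).map (fun i => |row.getD (i + 1) 0 - row.getD i 0|)

-- A's loop 'for d in range(max_depth)' with the break; fuel = number of remaining iterations.
def pvGoA (row firsts : List Int) (fuel : Nat) : List Int :=
  match fuel with
  | 0 => firsts
  | Nat.succ n =>
    if row.length < 2 then firsts
    else
      let row' := pvRowA row
      -- firsts.append(row[0]): row' is nonempty (len(row) ≥ 2), so getD 0 is exact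
      pvGoA row' (firsts ++ [row'.getD 0 0]) n

def gilbreath_first_elements (seq : List Int) (max_depth : Int) : List Int :=
  pvGoA seq [] max_depth.toNat

-- ===== PORT B =====
def gilbreath_first_elements_alt (seq : List Int) (max_depth : Int) : List Int :=
  if max_depth ≤ 0 ∨ seq.length < 2 then []
  else
    -- [abs(b - a) for a, b in zip(seq, seq[1:])]
    let diff := List.zipWith (fun a b => |b - a|) seq (seq.drop 1)
    -- diff[0]: diff is nonempty here, so getD 0 is exact
    diff.getD 0 0 :: gilbreath_first_elements_alt diff (max_depth - 1)
termination_by max_depth.toNat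
decreasing_by
  rename_i h
  omega

-- ===== PRECONDITION & SPEC =====
def Spec_gilbreath_first_elements (seq : List Int) (max_depth : Int) (out : List Int) : Prop := out = gilbreath_first_elements_alt seq max_depth
instance (seq : List Int) (max_depth : Int) (out : List Int) : Decidable (Spec_gilbreath_first_elements seq max_depth out) := by unfold Spec_gilbreath_first_elements; infer_instance

-- ===== CLAIM (what is proved, stated in full; the proofs are below) =====
def Claim_equal_gilbreath_first_elements : Prop := ∀ (seq : List Int) (max_depth : Int), Dom_gilbreath_first_elements seq max_depth → Spec_gilbreath_first_elements seq max_depth (gilbreath_first_elements seq max_depth)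

-- ===== LEMMAS AND PROOFS =====

-- A's index-based difference row equals B's zipWith difference row.
theorem pvRowA_eq_zip (row : List Int) :
    pvRowA row = List.zipWith (fun a b => |b - a|) row (row.drop 1) := by
  apply List.ext_getElem
  · simp only [pvRowA, List.length_map, List.length_range, List.length_zipWith,
      List.length_drop]
    omega
  · intro i h1 h2
    have hlen : i + 1 < row.length := by
      simp only [pvRowA, List.length_map, List.length_range] at h1; omega
    simp only [pvRowA, List.getElem_map, List.getElem_range, List.getElem_zipWith,
      List.getElem_drop]
    rw [List.getD_eq_getElem _ _ hlen, List.getD_eq_getElem _ _ (by omega : i < row.length)]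
    simp [Nat.add_comm]

theorem alt_nonpos (seq : List Int) (d : Int) (h : d ≤ 0) :
    gilbreath_first_elements_alt seq d = [] := by
  unfold gilbreath_first_elements_alt
  simp [h]

-- Loop invariant: running A's loop with 'fuel' iterations left and accumulator
-- 'firsts' appends exactly B's recursive result for the current row.
theorem pvGoA_eq (fuel : Nat) (row firsts : List Int) :
    pvGoA row firsts fuel = firsts ++ gilbreath_first_elements_alt row (fuel : Int) := by
  induction fuel generalizing row firsts with
  | zero => simp [pvGoA, alt_nonpos]
  | succ n ih =>
    by_cases h : row.length < 2
    · rw [pvGoA]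
      simp only [h, if_pos]
      rw [gilbreath_first_elements_alt]
      simp [h]
    · rw [pvGoA]
      simp only [h, if_neg, not_false_iff]
      rw [ih]
      have hcond : ¬(((n : Nat) + 1 : Int) ≤ 0 ∨ row.length < 2) := by
        rintro (hc | hc)
        · omega
        · exact h hc
      conv_rhs => rw [gilbreath_first_elements_alt]
      push_cast
      rw [if_neg hcond]
      have hcast : ((n : Nat) : Int) + 1 - 1 = ((n : Nat) : Int) := by ring
      rw [pvRowA_eq_zip, hcast]
      simp [List.append_assoc]

-- ===== VERDICT (by name: the statement is the Claim_ definition above) =====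
theorem gilbreath_first_elements_spec : Claim_equal_gilbreath_first_elements := by
  intro seq d _
  unfold Spec_gilbreath_first_elements gilbreath_first_elements
  rw [pvGoA_eq]
  simp only [List.nil_append]
  by_cases h : d ≤ 0
  · rw [alt_nonpos _ _ h, alt_nonpos]
    omega
  · congr 1
    omega
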